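-- pv_equiv track=rewrite | github.com/Rinnus/Liagent_OS_V0.1.2 | src/liagent/agent/planner.py | _iter_json_object_blobs
-- ===== SOURCE A (Python) =====
-- def _iter_json_object_blobs(text: str) -> list[str]:
--     """Extract candidate JSON object blobs with a brace-depth scan."""
--     s = str(text or "")
--     out: list[str] = []
--     depth = 0
--     start = -1
--     in_string = False
--     escaped = False
--     for idx, ch in enumerate(s):
--         if in_string:
--             if escaped:
--                 escaped = False
--                 continue
--             if ch == "\\":
--                 escaped = True
--                 continue
--             if ch == '"':
--                 in_string = False
--             continue
--         if ch == '"':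
--             in_string = True
--             continue
--         if ch == "{":
--             if depth == 0:
--                 start = idx
--             depth += 1
--             continue
--         if ch == "}":
--             if depth > 0:
--                 depth -= 1
--                 if depth == 0 and start >= 0:
--                     out.append(s[start:idx + 1])
--                     start = -1
--     return out
-- ===== SOURCE B (Python) =====
-- def _iter_json_object_blobs(text: str) -> list[str]:
--     """Two-pass: first mark positions not inside JSON strings, then match braces."""
--     s = str(text or "")
--     # pass 1: outside[i] is True iff position i is outside a JSON string literal
--     outside = []
--     in_string = False
--     escaped = False
--     for ch in s:
--         outside.append(not in_string)
--         if in_string: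
--             if escaped:
--                 escaped = False
--             elif ch == "\\":
--                 escaped = True
--             elif ch == '"':
--                 in_string = False
--         elif ch == '"':
--             in_string = True
--     # pass 2: depth-match only the structural braces
--     out = []
--     depth = 0
--     start = 0
--     for idx, ch in enumerate(s):
--         if not outside[idx]:
--             continue
--         if ch == "{":
--             if depth == 0:
--                 start = idx
--             depth += 1
--         elif ch == "}" and depth > 0:
--             depth -= 1
--             if depth == 0:
--                 out.append(s[start:idx + 1])
--     return out
-- ===== Notes on version B (the rewrite author's own statement) =====
-- stated objective: alternative
-- what changed: Replaced A's single five-state scan by two differently-shaped passes: a first pass builds a boolean mask of positions that lie in no JSON string (the escape/quote logic only), and a second pass depth-matches only the masked structural braces, dropping A's sentinel start=-1 and the redundant start>=0 guard.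
import Mathlib
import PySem

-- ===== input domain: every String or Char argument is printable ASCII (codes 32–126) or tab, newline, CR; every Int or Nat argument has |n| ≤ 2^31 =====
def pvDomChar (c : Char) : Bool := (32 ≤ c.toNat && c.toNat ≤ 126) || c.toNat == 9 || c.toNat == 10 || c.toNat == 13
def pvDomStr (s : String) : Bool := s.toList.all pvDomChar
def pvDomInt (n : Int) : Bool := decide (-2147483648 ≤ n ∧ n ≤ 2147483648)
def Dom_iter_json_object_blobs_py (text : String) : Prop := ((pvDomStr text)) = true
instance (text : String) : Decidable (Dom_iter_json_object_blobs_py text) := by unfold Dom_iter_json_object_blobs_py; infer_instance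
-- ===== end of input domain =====

-- ===== PORT A =====
-- B splits A's one five-state scan into a string-mask pass and a brace-match pass (alternative decomposition, same cost).
-- literal port of A's loop: state (out, depth, start, in_string, escaped), idx counts up
def pvLoopA (s : List Char) : List Char → Nat → List String → Int → Int → Bool → Bool → List String
  | [], _, out, _, _, _, _ => out
  | ch :: rest, idx, out, depth, start, ins, esc =>
    if ins then
      if esc then pvLoopA s rest (idx+1) out depth start ins false
      else if ch = '\\' then pvLoopA s rest (idx+1) out depth start ins true
      else if ch = '"' then pvLoopA s rest (idx+1) out depth start false esc
      else pvLoopA s rest (idx+1) out depth start ins esc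
    else if ch = '"' then pvLoopA s rest (idx+1) out depth start true esc
    else if ch = '{' then
      pvLoopA s rest (idx+1) out (depth+1) (if depth = 0 then (idx : Int) else start) ins esc
    else if ch = '}' then
      if 0 < depth then
        if depth - 1 = 0 ∧ 0 ≤ start then
          pvLoopA s rest (idx+1)
            (out ++ [String.ofList (PySem.List.slice s (some start) (some ((idx : Int) + 1)))])
            (depth - 1) (-1) ins esc
        else pvLoopA s rest (idx+1) out (depth - 1) start ins esc
      else pvLoopA s rest (idx+1) out depth start ins esc
    else pvLoopA s rest (idx+1) out depth start ins esc

def iter_json_object_blobs_py (text : String) : List String :=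
  pvLoopA text.toList text.toList 0 [] 0 (-1) false false

-- ===== PORT B =====
-- pass 1 of B: per-position "not inside a JSON string" mask
def pvMask : List Char → Bool → Bool → List Bool
  | [], _, _ => []
  | ch :: rest, ins, esc =>
    (!ins) ::
      (if ins then
        if esc then pvMask rest ins false
        else if ch = '\\' then pvMask rest ins true
        else if ch = '"' then pvMask rest false esc
        else pvMask rest ins esc
      else if ch = '"' then pvMask rest true esc
      else pvMask rest ins esc)

-- pass 2 of B: depth-match the structural braces
def pvLoopB (s : List Char) : List Char → List Bool → Nat → List String → Int → Int → List String
  | [], _, _, out, _, _ => out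
  | _ :: _, [], _, out, _, _ => out
  | ch :: rest, m :: ms, idx, out, depth, start =>
    if !m then pvLoopB s rest ms (idx+1) out depth start
    else if ch = '{' then
      pvLoopB s rest ms (idx+1) out (depth+1) (if depth = 0 then (idx : Int) else start)
    else if ch = '}' ∧ 0 < depth then
      if depth - 1 = 0 then
        pvLoopB s rest ms (idx+1)
          (out ++ [String.ofList (PySem.List.slice s (some start) (some ((idx : Int) + 1)))])
          (depth - 1) start
      else pvLoopB s rest ms (idx+1) out (depth - 1) start
    else pvLoopB s rest ms (idx+1) out depth start

def iter_json_object_blobs_py_alt (text : String) : List String :=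
  pvLoopB text.toList text.toList (pvMask text.toList false false) 0 [] 0 0

-- ===== PRECONDITION & SPEC =====
def Spec_iter_json_object_blobs_py (text : String) (out : List String) : Prop := out = iter_json_object_blobs_py_alt text
instance (text : String) (out : List String) : Decidable (Spec_iter_json_object_blobs_py text out) := by unfold Spec_iter_json_object_blobs_py; infer_instance

-- ===== CLAIM (what is proved, stated in full; the proofs are below) =====
def Claim_equal_iter_json_object_blobs_py : Prop := ∀ (text : String), Dom_iter_json_object_blobs_py text → Spec_iter_json_object_blobs_py text (iter_json_object_blobs_py text)

-- ===== LEMMAS AND PROOFS =====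

-- invariant: A's loop and B's pass-2 over the mask of the remaining suffix agree,
-- provided depth ≥ 0 and, while inside an object (0 < depth), the two start indices
-- coincide and are nonnegative.
theorem pvLoop_eq (s : List Char) :
    ∀ (rest : List Char) (idx : Nat) (out : List String) (depth sa sb : Int)
      (ins esc : Bool),
      0 ≤ depth → (0 < depth → sa = sb ∧ 0 ≤ sa) →
      pvLoopA s rest idx out depth sa ins esc
        = pvLoopB s rest (pvMask rest ins esc) idx out depth sb := by
  intro rest
  induction rest with
  | nil => intro idx out depth sa sb ins esc _ _; simp [pvLoopA, pvMask, pvLoopB]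
  | cons ch tl ih =>
    intro idx out depth sa sb ins esc hd hs
    by_cases hins : ins = true
    · subst hins
      by_cases hesc : esc = true
      · subst hesc
        simp only [pvLoopA, pvMask, pvLoopB, if_true, Bool.not_true]
        simpa using ih (idx+1) out depth sa sb true false hd hs
      · replace hesc : esc = false := by simpa using hesc
        subst hesc
        by_cases hbs : ch = '\\'
        · simp only [pvLoopA, pvMask, pvLoopB, hbs, if_true, if_false, Bool.not_true]
          simpa using ih (idx+1) out depth sa sb true true hd hs
        · by_cases hq : ch = '"'
          · simp only [pvLoopA, pvMask, pvLoopB, hbs, hq, if_true, if_false, Bool.not_true]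
            simpa [hbs] using ih (idx+1) out depth sa sb false false hd hs
          · simp only [pvLoopA, pvMask, pvLoopB, hbs, hq, if_false, Bool.not_true]
            simpa [hbs, hq] using ih (idx+1) out depth sa sb true false hd hs
    · replace hins : ins = false := by simpa using hins
      subst hins
      by_cases hq : ch = '"'
      · simp only [pvLoopA, pvMask, pvLoopB, hq, if_true, if_false, Bool.not_false]
        have hq2 : ¬ ('"' = '{') := by decide
        have hq3 : ¬ (('"' = '}') ∧ 0 < depth) := by simp
        simp only [hq2, hq3, if_false]
        exact ih (idx+1) out depth sa sb true esc hd hs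
      · by_cases hob : ch = '{'
        · simp only [pvLoopA, pvMask, pvLoopB, hq, hob, if_true, if_false, Bool.not_false]
          refine ih (idx+1) out (depth+1) _ _ false esc (by omega) ?_
          intro _
          by_cases h0 : depth = 0
          · simp [h0]
          · have hdp : 0 < depth := lt_of_le_of_ne hd (Ne.symm h0)
            obtain ⟨h1, h2⟩ := hs hdp
            rw [if_neg h0, if_neg h0]
            exact ⟨h1, h2⟩
        · by_cases hcb : ch = '}'
          · simp only [pvLoopA, pvMask, pvLoopB, hq, hob, hcb, if_true, if_false, Bool.not_false]
            by_cases hdp : 0 < depth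
            · obtain ⟨h1, h2⟩ := hs hdp
              simp only [hdp, and_true, if_true]
              by_cases h1d : depth - 1 = 0
              · simp only [h1d, h2, and_self, if_true]
                subst h1
                exact ih (idx+1) _ 0 (-1) sa false esc (by omega) (by omega)
              · simp only [h1d, false_and, if_false]
                refine ih (idx+1) out (depth-1) sa sb false esc (by omega) ?_
                intro _; exact ⟨h1, h2⟩
            · simp only [hdp, and_false, if_false]
              exact ih (idx+1) out depth sa sb false esc hd hs
          · simp only [pvLoopA, pvMask, pvLoopB, hq, hob, hcb, if_false, Bool.not_false, false_and]
            exact ih (idx+1) out depth sa sb false esc hd hs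

-- ===== VERDICT (by name: the statement is the Claim_ definition above) =====
theorem iter_json_object_blobs_py_spec : Claim_equal_iter_json_object_blobs_py := by
  intro text _
  unfold Spec_iter_json_object_blobs_py iter_json_object_blobs_py iter_json_object_blobs_py_alt
  exact pvLoop_eq text.toList text.toList 0 [] 0 (-1) 0 false false le_rfl (by omega)
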